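-- pv_equiv track=rewrite | github.com/TowaYokoyama/studyCompeProg | AtCorder/ABC/454/D.py | F
-- ===== SOURCE A (Python) =====
-- def F(S):
--     st = []
--     for i in S:
--         st.append(i)
--         while True:
--             n = len(st)
--             if n >= 4 and st[-4] == '(' and st[-3] == 'x' and st[-2] == 'x' and st[-1] == ')':
--                 st.pop()
--                 st.pop()
--                 st.pop()
--                 st.pop()
--                 st.append('x')
--                 st.append('x')
--             else:
--                 break
--     return st
-- ===== SOURCE B (Python) =====
-- def F(S):
--     s = S
--     while '(xx)' in s:
--         s = s.replace('(xx)', 'xx')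
--     return list(s)
-- ===== Notes on version B (the rewrite author's own statement) =====
-- stated objective: idiomatic
-- what changed: Replaced the char-by-char stack with suffix checks by repeated whole-string rewriting s = s.replace('(xx)', 'xx') until the pattern disappears; correct because the non-self-overlapping, length-decreasing rewrite is confluent.
import Mathlib
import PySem

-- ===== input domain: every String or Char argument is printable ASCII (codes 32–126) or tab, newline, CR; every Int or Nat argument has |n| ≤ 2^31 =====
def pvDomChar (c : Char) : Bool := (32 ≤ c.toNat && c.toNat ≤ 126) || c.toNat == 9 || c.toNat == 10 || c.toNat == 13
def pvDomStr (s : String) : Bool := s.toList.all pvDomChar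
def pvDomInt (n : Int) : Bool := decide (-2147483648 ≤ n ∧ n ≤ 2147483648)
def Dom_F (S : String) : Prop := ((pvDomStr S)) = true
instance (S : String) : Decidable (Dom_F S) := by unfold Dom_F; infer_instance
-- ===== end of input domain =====

-- B replaces A's char-by-char stack (pop "(xx)" suffixes) by repeated whole-string
-- rewriting s = s.replace('(xx)', 'xx') until no occurrence is left (objective: idiomatic).

-- ===== PORT A =====
-- A's inner `while True` loop: while the last four stack entries are "(","x","x",")",
-- pop them (four `st.pop()`s remove the last element each) and append "x","x".
def innerLoop (st : List String) : List String :=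
  -- n = len(st); the four st[-k] reads are PySem.List.pyGet? at negative indices
  if h : (st.length : Int) ≥ 4 ∧ PySem.List.pyGet? st (-4) = some "(" ∧
      PySem.List.pyGet? st (-3) = some "x" ∧ PySem.List.pyGet? st (-2) = some "x" ∧
      PySem.List.pyGet? st (-1) = some ")" then
    innerLoop (st.dropLast.dropLast.dropLast.dropLast ++ ["x", "x"])
  else st
termination_by st.length
decreasing_by
  have h4 : 4 ≤ st.length := by exact_mod_cast h.1
  simp [List.length_dropLast]; omega

def F (S : String) : List String :=
  -- `for i in S: st.append(i); <while loop>` over the characters of S (each pushed as a 1-char string)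
  S.toList.foldl (fun st c => innerLoop (st ++ [String.singleton c])) []

-- ===== PORT B =====
-- termination lemmas for B's `while` loop: one `s.replace('(xx)','xx')` with the pattern present
-- strictly shortens the string (cited by name in decreasing_by)
theorem go_len_le (fuel : Nat) : ∀ (l acc : List Char),
    (PySem.Chars.replace.go ['(','x','x',')'] ['x','x'] fuel l acc).length ≤ acc.length + l.length := by
  induction fuel with
  | zero => intro l acc; simp [PySem.Chars.replace.go]
  | succ fuel ih =>
    intro l acc
    cases l with
    | nil => simp [PySem.Chars.replace.go]
    | cons c t =>
      rw [PySem.Chars.replace.go]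
      split
      · have hp : ['(','x','x',')'] <+: (c :: t) := by
          rename_i hpre; exact (List.isPrefixOf_iff_prefix).1 hpre
        have h4 : 4 ≤ (c :: t).length := hp.length_le
        have := ih (List.drop 4 (c :: t)) (['x','x'].reverse ++ acc)
        simp at this h4 ⊢; omega
      · have := ih t (c :: acc); simp at this ⊢; omega

theorem go_len_lt (fuel : Nat) : ∀ (l acc : List Char), l.length ≤ fuel →
    ['(','x','x',')'] <:+: l →
    (PySem.Chars.replace.go ['(','x','x',')'] ['x','x'] fuel l acc).length < acc.length + l.length := by
  induction fuel with
  | zero =>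
    intro l acc hlen hinf
    exfalso
    have h0 : l = [] := by rw [← List.length_eq_zero_iff]; omega
    subst h0
    have := hinf.length_le; simp at this
  | succ fuel ih =>
    intro l acc hlen hinf
    cases l with
    | nil => exfalso; have := hinf.length_le; simp at this
    | cons c t =>
      rw [PySem.Chars.replace.go]
      split
      · rename_i hpre
        have hp : ['(','x','x',')'] <+: (c :: t) := (List.isPrefixOf_iff_prefix).1 hpre
        have h4 : 4 ≤ (c :: t).length := hp.length_le
        have := go_len_le fuel (List.drop 4 (c :: t)) (['x','x'].reverse ++ acc)
        simp at this h4 ⊢; omega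
      · rename_i hpre
        have hnp : ¬ ['(','x','x',')'] <+: (c :: t) := by
          intro hp; exact hpre ((List.isPrefixOf_iff_prefix).2 hp)
        have hit : ['(','x','x',')'] <:+: t := by
          rcases (List.infix_cons_iff).1 hinf with h | h
          · exact absurd h hnp
          · exact h
        have := ih t (c :: acc) (by simp at hlen ⊢; omega) hit
        simp at this ⊢; omega

theorem replace_length_lt (s : List Char)
    (h : PySem.Chars.isIn ['(','x','x',')'] s = true) :
    (PySem.Chars.replace s ['(','x','x',')'] ['x','x']).length < s.length := by
  have hinf : ['(','x','x',')'] <:+: s := (PySem.Chars.isIn_iff_infix _ _).1 h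
  rw [PySem.Chars.replace]
  simp only [List.isEmpty_iff]
  have := go_len_lt s.length s [] le_rfl hinf
  simp at this ⊢
  omega

-- B's `while '(xx)' in s: s = s.replace('(xx)', 'xx')`, on the character list of s
-- (PySem.Str.isIn/replace are exactly PySem.Chars.isIn/replace on .toList)
def bLoop (s : List Char) : List Char :=
  if h : PySem.Chars.isIn ['(','x','x',')'] s then
    bLoop (PySem.Chars.replace s ['(','x','x',')'] ['x','x'])
  else s
termination_by s.length
decreasing_by exact replace_length_lt s h

def F_alt (S : String) : List String :=
  -- return list(s): the final string as a list of 1-char strings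
  (bLoop S.toList).map (fun c => String.singleton c)

-- ===== PRECONDITION & SPEC =====
def Spec_F (S : String) (out : List String) : Prop := out = F_alt S
instance (S : String) (out : List String) : Decidable (Spec_F S out) := by unfold Spec_F; infer_instance

-- ===== CLAIM (what is proved, stated in full; the proofs are below) =====
def Claim_equal_F : Prop := ∀ (S : String), Dom_F S → Spec_F S (F S)

-- ===== LEMMAS AND PROOFS =====

theorem pyGet?_neg {α : Type} (l : List α) (k : Nat) (h1 : 1 ≤ k) (h2 : k ≤ l.length) :
    PySem.List.pyGet? l (-(k : Int)) = l[l.length - k]? := by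
  have hkn : -(l.length : Int) ≤ -(k : Int) := by omega
  simp [PySem.List.pyGet?, PySem.List.pyIdx?, hkn]
  rw [if_neg (by omega : ¬ k = 0)]
  simp

theorem pyGet?_append4 {α : Type} (u : List α) (a b c d : α) :
    PySem.List.pyGet? (u ++ [a,b,c,d]) (-4) = some a ∧
    PySem.List.pyGet? (u ++ [a,b,c,d]) (-3) = some b ∧
    PySem.List.pyGet? (u ++ [a,b,c,d]) (-2) = some c ∧
    PySem.List.pyGet? (u ++ [a,b,c,d]) (-1) = some d := by
  have hlen : (u ++ [a,b,c,d]).length = u.length + 4 := by simp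
  have e4 : PySem.List.pyGet? (u ++ [a,b,c,d]) (-4) = some a := by
    rw [show (-4 : Int) = -((4:Nat) : Int) by norm_num, pyGet?_neg _ 4 (by omega) (by simp)]
    rw [hlen, show u.length + 4 - 4 = u.length + 0 by omega]
    rw [List.getElem?_append_right (by omega)]
    simp
  have e3 : PySem.List.pyGet? (u ++ [a,b,c,d]) (-3) = some b := by
    rw [show (-3 : Int) = -((3:Nat) : Int) by norm_num, pyGet?_neg _ 3 (by omega) (by simp)]
    rw [hlen, show u.length + 4 - 3 = u.length + 1 by omega]
    rw [List.getElem?_append_right (by omega)]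
    simp
  have e2 : PySem.List.pyGet? (u ++ [a,b,c,d]) (-2) = some c := by
    rw [show (-2 : Int) = -((2:Nat) : Int) by norm_num, pyGet?_neg _ 2 (by omega) (by simp)]
    rw [hlen, show u.length + 4 - 2 = u.length + 2 by omega]
    rw [List.getElem?_append_right (by omega)]
    simp
  have e1 : PySem.List.pyGet? (u ++ [a,b,c,d]) (-1) = some d := by
    rw [show (-1 : Int) = -((1:Nat) : Int) by norm_num, pyGet?_neg _ 1 (by omega) (by simp)]
    rw [hlen, show u.length + 4 - 1 = u.length + 3 by omega]
    rw [List.getElem?_append_right (by omega)]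
    simp
  exact ⟨e4, e3, e2, e1⟩

theorem inner_last_ne (st : List String) (v : String) (hv : v ≠ ")") :
    innerLoop (st ++ [v]) = st ++ [v] := by
  rw [innerLoop]
  rw [dif_neg]
  intro h
  have hlast : PySem.List.pyGet? (st ++ [v]) (-1) = some v := by
    rw [show (-1 : Int) = -((1:Nat) : Int) by norm_num, pyGet?_neg _ 1 (by omega) (by simp)]
    simp
  rw [hlast] at h
  exact hv (Option.some_injective _ h.2.2.2.2)

theorem assoc4 {α : Type} (u : List α) (a b c d : α) :
    u ++ [a,b,c,d] = (((u ++ [a]) ++ [b]) ++ [c]) ++ [d] := by simp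

theorem inner_append4 (u : List String) (a b c d : String) :
    innerLoop (u ++ [a,b,c,d]) =
      if a = "(" ∧ b = "x" ∧ c = "x" ∧ d = ")" then u ++ ["x","x"] else u ++ [a,b,c,d] := by
  obtain ⟨g4, g3, g2, g1⟩ := pyGet?_append4 u a b c d
  have hlen : ((u ++ [a,b,c,d]).length : Int) = (u.length : Int) + 4 := by simp
  by_cases hc : a = "(" ∧ b = "x" ∧ c = "x" ∧ d = ")"
  · rw [if_pos hc]
    rw [innerLoop]
    rw [dif_pos ⟨by rw [hlen]; omega, by rw [g4, hc.1], by rw [g3, hc.2.1], by rw [g2, hc.2.2.1],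
      by rw [g1, hc.2.2.2]⟩]
    rw [assoc4, List.dropLast_concat, List.dropLast_concat, List.dropLast_concat,
      List.dropLast_concat]
    rw [show (["x","x"] : List String) = ["x"] ++ ["x"] by simp, ← List.append_assoc]
    exact inner_last_ne (u ++ ["x"]) "x" (by decide)
  · rw [if_neg hc]
    rw [innerLoop]
    rw [dif_neg]
    intro h
    obtain ⟨-, h4, h3, h2, h1⟩ := h
    rw [g4] at h4; rw [g3] at h3; rw [g2] at h2; rw [g1] at h1
    exact hc ⟨Option.some_injective _ h4, Option.some_injective _ h3,
      Option.some_injective _ h2, Option.some_injective _ h1⟩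

def run (st : List String) (l : List Char) : List String :=
  l.foldl (fun st c => innerLoop (st ++ [String.singleton c])) st

theorem run_cons (st : List String) (c : Char) (l : List Char) :
    run st (c :: l) = run (innerLoop (st ++ [String.singleton c])) l := rfl

theorem singleton_eq_iff (c d : Char) : String.singleton c = String.singleton d ↔ c = d := by
  constructor
  · intro h
    have := congrArg String.toList h
    simpa [String.singleton] using this
  · intro h; rw [h]

theorem run_push (st : List String) (c : Char) (l : List Char) (hc : c ≠ ')') :
    run st (c :: l) = run (st ++ [String.singleton c]) l := by
  rw [run_cons, inner_last_ne]
  intro h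
  exact hc ((singleton_eq_iff c ')').1 (by rw [h]; rfl))

theorem run_xx (st : List String) (l : List Char) :
    run st ('x' :: 'x' :: l) = run (st ++ ["x","x"]) l := by
  rw [run_push _ _ _ (by decide), run_push _ _ _ (by decide)]
  rw [show (["x","x"] : List String) = ["x"] ++ ["x"] by simp, ← List.append_assoc]
  rfl

theorem run_pat (st : List String) (l : List Char) :
    run st ('(' :: 'x' :: 'x' :: ')' :: l) = run (st ++ ["x","x"]) l := by
  rw [run_push _ _ _ (by decide), run_push _ _ _ (by decide), run_push _ _ _ (by decide), run_cons]
  have : ((st ++ [String.singleton '(']) ++ [String.singleton 'x']) ++ [String.singleton 'x']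
      ++ [String.singleton ')'] = st ++ ["(", "x", "x", ")"] := by
    simp [String.singleton]
  rw [this, inner_append4]
  simp

-- Python's s.replace('(xx)','xx') as structural recursion (proved equal to the PySem primitive)
def replAll (l : List Char) : List Char :=
  if h : ['(','x','x',')'] <+: l then 'x' :: 'x' :: replAll (l.drop 4)
  else
    match l with
    | [] => []
    | c :: t => c :: replAll t
termination_by l.length
decreasing_by
  · have := h.length_le; simp at this ⊢; omega
  · simp

theorem replAll_pos (l : List Char) (h : ['(','x','x',')'] <+: l) :
    replAll l = 'x' :: 'x' :: replAll (l.drop 4) := by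
  rw [replAll, dif_pos h]

theorem replAll_nil : replAll [] = [] := by
  rw [replAll, dif_neg (by decide)]

theorem replAll_cons (c : Char) (t : List Char) (h : ¬ ['(','x','x',')'] <+: (c :: t)) :
    replAll (c :: t) = c :: replAll t := by
  rw [replAll, dif_neg h]

theorem go_eq (fuel : Nat) : ∀ (l acc : List Char), l.length ≤ fuel →
    PySem.Chars.replace.go ['(','x','x',')'] ['x','x'] fuel l acc = acc.reverse ++ replAll l := by
  induction fuel with
  | zero =>
    intro l acc hlen
    have h0 : l = [] := by rw [← List.length_eq_zero_iff]; omega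
    subst h0
    rw [replAll_nil]
    simp [PySem.Chars.replace.go]
  | succ fuel ih =>
    intro l acc hlen
    cases l with
    | nil => rw [replAll_nil]; simp [PySem.Chars.replace.go]
    | cons c t =>
      rw [PySem.Chars.replace.go]
      split
      · rename_i hpre
        have hp : ['(','x','x',')'] <+: (c :: t) := (List.isPrefixOf_iff_prefix).1 hpre
        have h4 : 4 ≤ (c :: t).length := hp.length_le
        simp only [show (['(','x','x',')'] : List Char).length = 4 from rfl]
        rw [ih (List.drop 4 (c :: t)) (['x','x'].reverse ++ acc) (by simp at hlen h4 ⊢; omega)]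
        rw [replAll_pos _ hp]
        simp
      · rename_i hpre
        have hnp : ¬ ['(','x','x',')'] <+: (c :: t) := fun hp =>
          hpre ((List.isPrefixOf_iff_prefix).2 hp)
        rw [ih t (c :: acc) (by simp at hlen ⊢; omega)]
        rw [replAll_cons _ _ hnp]
        simp

theorem replace_eq (l : List Char) :
    PySem.Chars.replace l ['(','x','x',')'] ['x','x'] = replAll l := by
  rw [PySem.Chars.replace]
  simp only [List.isEmpty_iff]
  rw [if_neg (by decide)]
  simpa using go_eq l.length l [] le_rfl

theorem run_replAll (l : List Char) : ∀ st : List String, run st (replAll l) = run st l := by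
  induction l using replAll.induct with
  | case1 l h ih =>
    intro st
    obtain ⟨t, ht⟩ := h
    subst ht
    have hdrop : List.drop 4 (['(','x','x',')'] ++ t) = t := by simp
    rw [replAll_pos _ ⟨t, rfl⟩, hdrop]
    rw [show (['(','x','x',')'] ++ t : List Char) = '(' :: 'x' :: 'x' :: ')' :: t from rfl]
    rw [run_pat, run_xx]
    rw [hdrop] at ih
    exact ih (st ++ ["x","x"])
  | case2 h =>
    intro st
    rw [replAll_nil]
  | case3 c t h ih =>
    intro st
    rw [replAll_cons _ _ h]
    rw [run_cons, run_cons]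
    exact ih _

theorem exists_last4 (w : List Char) (h : 4 ≤ w.length) :
    ∃ u a b c d, w = u ++ [a, b, c, d] := by
  have hr : 4 ≤ w.reverse.length := by simpa using h
  obtain ⟨d, r1, h1⟩ := List.exists_cons_of_ne_nil
    (l := w.reverse) (by intro hx; rw [hx] at hr; simp at hr)
  rw [h1] at hr; simp at hr
  obtain ⟨c, r2, h2⟩ := List.exists_cons_of_ne_nil
    (l := r1) (by intro hx; rw [hx] at hr; simp at hr)
  rw [h2] at hr; simp at hr
  obtain ⟨b, r3, h3⟩ := List.exists_cons_of_ne_nil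
    (l := r2) (by intro hx; rw [hx] at hr; simp at hr)
  rw [h3] at hr; simp at hr
  obtain ⟨a, r4, h4⟩ := List.exists_cons_of_ne_nil
    (l := r3) (by intro hx; rw [hx] at hr; simp at hr)
  refine ⟨r4.reverse, a, b, c, d, ?_⟩
  have hw : w = w.reverse.reverse := by simp
  rw [hw, h1, h2, h3, h4]
  simp

theorem inner_id_of_not_suffix (w : List Char)
    (hw : ¬ ['(','x','x',')'] <:+ w) :
    innerLoop (w.map String.singleton) = w.map String.singleton := by
  by_cases h4 : 4 ≤ w.length
  · obtain ⟨u, a, b, c, d, hw4⟩ := exists_last4 w h4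
    subst hw4
    rw [show (u ++ [a,b,c,d]).map String.singleton
        = u.map String.singleton ++ [String.singleton a, String.singleton b,
          String.singleton c, String.singleton d] by simp]
    rw [inner_append4]
    rw [if_neg]
    intro hc
    apply hw
    have ha : a = '(' := (singleton_eq_iff a '(').1 (by rw [hc.1]; rfl)
    have hb : b = 'x' := (singleton_eq_iff b 'x').1 (by rw [hc.2.1]; rfl)
    have hcc : c = 'x' := (singleton_eq_iff c 'x').1 (by rw [hc.2.2.1]; rfl)
    have hd : d = ')' := (singleton_eq_iff d ')').1 (by rw [hc.2.2.2]; rfl)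
    subst ha; subst hb; subst hcc; subst hd
    exact ⟨u, rfl⟩
  · rw [innerLoop, dif_neg]
    intro h
    have := h.1
    simp at this
    omega

theorem run_of_no_infix : ∀ (l u : List Char), ¬ ['(','x','x',')'] <:+: (u ++ l) →
    run (u.map String.singleton) l = (u ++ l).map String.singleton := by
  intro l
  induction l with
  | nil => intro u h; simp [run]
  | cons c t ih =>
    intro u h
    rw [run_cons]
    have hmap : u.map String.singleton ++ [String.singleton c]
        = (u ++ [c]).map String.singleton := by simp
    rw [hmap, inner_id_of_not_suffix]
    · have hrec := ih (u ++ [c]) (by simpa using h)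
      simpa using hrec
    · intro hs
      apply h
      have h1 : ['(','x','x',')'] <:+: (u ++ [c]) := hs.isInfix
      have h2 : (u ++ [c]) <+: (u ++ c :: t) := by
        refine ⟨t, by simp⟩
      exact h1.trans h2.isInfix

theorem run_bLoop (s : List Char) : run [] s = (bLoop s).map String.singleton := by
  induction s using bLoop.induct with
  | case1 s h ih =>
    rw [bLoop, dif_pos h, ← ih, replace_eq]
    exact (run_replAll s []).symm
  | case2 s h =>
    rw [bLoop, dif_neg h]
    have hni : ¬ ['(','x','x',')'] <:+: s := by
      intro hi
      exact h ((PySem.Chars.isIn_iff_infix _ _).2 hi)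
    have := run_of_no_infix s [] (by simpa using hni)
    simpa using this

-- ===== VERDICT (by name: the statement is the Claim_ definition above) =====
theorem F_spec : Claim_equal_F := by
  intro S _
  unfold Spec_F F F_alt
  exact run_bLoop S.toList
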